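-- pv_equiv track=rewrite | github.com/odwdinc/nintendo_switch_pro_controller_emulator | data/N_Switch.py | reportCheck
-- ===== SOURCE A (Python) =====
-- def reportCheck(jb,jbo):
-- 	NeedsUpdate = False
-- 	for byew in jb:
-- 		if jbo[byew] != jb[byew]:
-- 			temp = jb[byew]
-- 			jbo[byew] = temp
-- 			NeedsUpdate = True
-- 	return NeedsUpdate
-- ===== SOURCE B (Python) =====
-- def reportCheck(jb, jbo):
--     # set algebra on dict views: update needed iff jb's items are not a subset of jbo's
--     NeedsUpdate = not (jb.items() <= jbo.items())
--     if NeedsUpdate: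
--         jbo.update(jb)
--     return NeedsUpdate
-- ===== Notes on version B (the rewrite author's own statement) =====
-- stated objective: idiomatic
-- what changed: B replaces A's per-key compare-and-overwrite loop with set algebra on dict item views (NeedsUpdate = not jb.items() <= jbo.items()) followed by one bulk jbo.update(jb); no explicit loop, no threaded flag.
import Mathlib
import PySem

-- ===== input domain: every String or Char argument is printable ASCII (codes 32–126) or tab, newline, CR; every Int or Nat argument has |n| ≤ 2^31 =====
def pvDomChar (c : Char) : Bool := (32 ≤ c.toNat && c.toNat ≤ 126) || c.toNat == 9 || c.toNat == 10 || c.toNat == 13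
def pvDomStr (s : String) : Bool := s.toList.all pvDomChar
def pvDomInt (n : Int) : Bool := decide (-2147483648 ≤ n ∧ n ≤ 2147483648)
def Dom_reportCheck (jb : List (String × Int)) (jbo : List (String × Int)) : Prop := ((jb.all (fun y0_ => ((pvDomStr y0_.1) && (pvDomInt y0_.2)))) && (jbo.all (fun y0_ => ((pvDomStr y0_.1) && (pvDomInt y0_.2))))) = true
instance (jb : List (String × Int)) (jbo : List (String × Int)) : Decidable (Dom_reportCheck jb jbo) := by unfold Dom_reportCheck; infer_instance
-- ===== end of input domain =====

-- B replaces A's per-key compare-and-overwrite loop with a subset test on dict item views plus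
-- one bulk update; equivalence is about the RETURN value (both Pythons leave jbo in the same state on Pre_).

-- ===== PORT A =====
-- the loop body of A: lookup jbo[byew] (current state), compare with jb[byew], overwrite + set flag
def reportCheckStep (db : PySem.Dict String Int)
    (st : PySem.Dict String Int × Bool) (byew : String) : PySem.Dict String Int × Bool :=
  match db.get? byew with
  | some temp => if st.1.get? byew ≠ some temp then (st.1.insert byew temp, true) else st
  | none => st  -- unreachable: byew ranges over db.keys

def reportCheck (jb : List (String × Int)) (jbo : List (String × Int)) : Bool :=
  let db := PySem.Dict.ofList jb
  (db.keys.foldl (reportCheckStep db) (PySem.Dict.ofList jbo, false)).2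

-- ===== PORT B =====
def reportCheck_alt (jb : List (String × Int)) (jbo : List (String × Int)) : Bool :=
  let db := PySem.Dict.ofList jb
  let dbo := PySem.Dict.ofList jbo
  -- not (jb.items() <= jbo.items()): subset test on the (key, value) pairs
  let needsUpdate := !(db.items.all (fun p => dbo.items.contains p))
  -- the 'jbo.update(jb)' branch only mutates jbo; it does not affect the returned value
  needsUpdate

-- ===== PRECONDITION & SPEC =====
-- Pre_ excludes exactly the inputs on which Python A raises KeyError: a key of jb absent from jbo.
def Pre_reportCheck (jb : List (String × Int)) (jbo : List (String × Int)) : Prop :=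
  ∀ p ∈ jb, p.1 ∈ jbo.map Prod.fst
instance (jb : List (String × Int)) (jbo : List (String × Int)) : Decidable (Pre_reportCheck jb jbo) := by unfold Pre_reportCheck; infer_instance
def pvWitness_reportCheck : (List (String × Int)) × (List (String × Int)) :=
  ([("a", 1), ("b", 2)], [("a", 1), ("b", 3)])
def Spec_reportCheck (jb : List (String × Int)) (jbo : List (String × Int)) (out : Bool) : Prop := out = reportCheck_alt jb jbo
instance (jb : List (String × Int)) (jbo : List (String × Int)) (out : Bool) : Decidable (Spec_reportCheck jb jbo out) := by unfold Spec_reportCheck; infer_instance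

-- ===== CLAIM (what is proved, stated in full; the proofs are below) =====
def Claim_equal_reportCheck : Prop := ∀ (jb : List (String × Int)) (jbo : List (String × Int)), Dom_reportCheck jb jbo → Pre_reportCheck jb jbo → Spec_reportCheck jb jbo (reportCheck jb jbo)

-- ===== LEMMAS AND PROOFS =====

-- A's interleaved fold sets the flag iff some key differs w.r.t. the ORIGINAL jbo (r):
-- inserts only happen at already-processed keys, which are distinct from the remaining ones.
theorem reportCheck_foldl_flag (db r : PySem.Dict String Int) :
    ∀ (ks : List String) (d : PySem.Dict String Int) (b : Bool),
      ks.Nodup → (∀ k ∈ ks, d.get? k = r.get? k) → (∀ k ∈ ks, ∃ v, db.get? k = some v) →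
      (ks.foldl (reportCheckStep db) (d, b)).2
        = (b || ks.any (fun k => r.get? k != db.get? k)) := by
  intro ks
  induction ks with
  | nil => intro d b _ _ _; simp
  | cons k ks ih =>
    intro d b hnd hr hs
    obtain ⟨v, hv⟩ := hs k (by simp)
    have hrk : d.get? k = r.get? k := hr k (by simp)
    simp only [List.foldl_cons, List.any_cons, reportCheckStep, hv]
    by_cases hne : d.get? k ≠ some v
    · simp only [if_pos hne]
      rw [ih (d.insert k v) true (List.nodup_cons.mp hnd).2
          (fun k' hk' => by
            rw [PySem.Dict.get?_insert_of_ne _ _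
              (fun h : k' = k => (List.nodup_cons.mp hnd).1 (h ▸ hk'))]
            exact hr k' (by simp [hk']))
          (fun k' hk' => hs k' (by simp [hk']))]
      have hhd : (r.get? k != some v) = true := by
        rw [← hrk]; simpa using hne
      rw [hhd]; simp
    · rw [not_not] at hne
      rw [if_neg (show ¬ (d.get? k ≠ some v) from fun h => h hne)]
      rw [ih d b (List.nodup_cons.mp hnd).2
          (fun k' hk' => hr k' (by simp [hk']))
          (fun k' hk' => hs k' (by simp [hk']))]
      have hhd : (r.get? k != some v) = false := by
        rw [← hrk, hne]; simp
      rw [hhd]; simp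

-- keys-side "some key differs" equals items-side "some pair missing from jbo's items"
theorem any_keys_eq_not_all_items (db r : PySem.Dict String Int)
    (hdb : db.keys.Nodup) (hr : r.keys.Nodup) :
    db.keys.any (fun k => r.get? k != db.get? k)
      = !(db.items.all (fun p => r.items.contains p)) := by
  have hkeys : db.keys = db.items.map Prod.fst := rfl
  rw [hkeys, List.any_map, Bool.eq_iff_iff, List.any_eq_true]
  simp only [Bool.not_eq_true', List.all_eq_false, Function.comp, List.contains_eq_mem]
  constructor
  · rintro ⟨⟨k, v⟩, hmem, hdiff⟩
    refine ⟨(k, v), hmem, fun hmemr => ?_⟩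
    have hdv : db.get? k = some v := PySem.Dict.get?_of_mem_items db hmem hdb
    have hrv : r.get? k = some v := PySem.Dict.get?_of_mem_items r (of_decide_eq_true hmemr) hr
    simp [hdv, hrv] at hdiff
  · rintro ⟨⟨k, v⟩, hmem, hnc⟩
    refine ⟨(k, v), hmem, ?_⟩
    have hdv : db.get? k = some v := PySem.Dict.get?_of_mem_items db hmem hdb
    have : r.get? k ≠ some v := fun h => hnc (decide_eq_true (PySem.Dict.mem_items_of_get?_eq_some r h))
    simp [hdv, bne_iff_ne, this]

-- ===== VERDICT (by name: the statement is the Claim_ definition above) =====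
theorem reportCheck_spec : Claim_equal_reportCheck := by
  intro jb jbo _ _
  unfold Spec_reportCheck reportCheck reportCheck_alt
  simp only []
  rw [reportCheck_foldl_flag (PySem.Dict.ofList jb) (PySem.Dict.ofList jbo)
      (PySem.Dict.ofList jb).keys (PySem.Dict.ofList jbo) false
      (PySem.Dict.nodup_keys_ofList jb)
      (fun _ _ => rfl)
      (fun k hk => by
        cases h : (PySem.Dict.ofList jb).get? k with
        | some v => exact ⟨v, rfl⟩
        | none =>
          exact absurd hk ((PySem.Dict.get?_eq_none_iff_not_mem_keys _ _).mp h)),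
    any_keys_eq_not_all_items _ _ (PySem.Dict.nodup_keys_ofList jb) (PySem.Dict.nodup_keys_ofList jbo)]
  simp
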